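-- pv_equiv track=rewrite | github.com/mikeday37/aoc2025 | day06/solve.py | chop_columns
-- ===== SOURCE A (Python) =====
-- def is_column_blank(column_index, input):
--     return all(line[column_index] == ' ' for line in input)
--
-- def chop_columns(raw_input):
--     input = raw_input.splitlines()
--     width, height = len(input[0]), len(input)
--     blocks = []
--     block_start = 0
--     for column_index in range(1, width):
--         if is_column_blank(column_index, input):
--             blocks.append([line[block_start:column_index] for line in input])
--             block_start = column_index + 1
--     blocks.append([line[block_start:] for line in input])
--     return blocks
-- ===== SOURCE B (Python) =====
-- def chop_columns(raw_input):
--     lines = raw_input.splitlines()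
--     height = len(lines)
--     width = len(lines[0])
--     # transposed view: one string per column
--     cols = [''.join(line[i] for line in lines) for i in range(width)]
--     blank = ' ' * height
--     cuts = [i for i in range(1, width) if cols[i] == blank]
--     starts = [0] + [c + 1 for c in cuts]
--     ends = cuts + [width]
--     return [[''.join(cols[j][r] for j in range(s, e)) for r in range(height)]
--             for s, e in zip(starts, ends)]
-- ===== Notes on version B (the rewrite author's own statement) =====
-- stated objective: alternative
-- what changed: B builds the transposed per-column strings once, detects blank columns by comparing each column string against the all-blank column, computes all cut points up front and reconstructs every block from column ranges, instead of A's row-oriented fold that slices rows while scanning with a running block_start.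
-- intended difference: On inputs whose lines are all at least as long as the first line but some strictly longer, A's final block keeps each line's overhang beyond the grid width while B crops every block to the width set by the first line, which is the intended behaviour of a grid chopper. — e.g. on chop_columns("a b\nc dx"): A returns [["a", "c"], ["b", "dx"]], B returns [["a", "c"], ["b", "d"]]
-- outside the precondition, e.g. on chop_columns('ab\nc'): A returns [['ab', 'c']], B raises IndexError
import Mathlib
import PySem

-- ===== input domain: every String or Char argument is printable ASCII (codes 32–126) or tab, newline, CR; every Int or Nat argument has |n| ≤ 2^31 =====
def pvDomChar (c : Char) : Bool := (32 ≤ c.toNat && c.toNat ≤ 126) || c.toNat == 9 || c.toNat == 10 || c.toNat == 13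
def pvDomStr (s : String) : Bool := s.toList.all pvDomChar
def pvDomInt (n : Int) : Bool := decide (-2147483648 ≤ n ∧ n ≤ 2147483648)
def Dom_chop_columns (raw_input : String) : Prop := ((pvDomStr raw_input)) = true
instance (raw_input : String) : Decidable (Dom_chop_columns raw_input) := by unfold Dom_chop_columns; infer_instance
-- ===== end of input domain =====

-- B replaces A's row-slicing fold (running block_start, blocks grown while scanning) by a
-- column-oriented pass: build the transposed per-column strings once, find all cut columns by
-- comparing against the blank column, then reconstruct each block from the column ranges.

-- ===== PORT A =====
-- all(line[column_index] == ' ' for line in input); line[ci] in range under Pre_ (IndexError excluded)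
def pvIsColumnBlank (column_index : Int) (input : List String) : Bool :=
  input.all (fun line => PySem.Str.pyGet? line column_index == some ' ')

def chop_columns (raw_input : String) : List (List String) :=
  let input := PySem.Str.splitlines raw_input
  -- input[0]: IndexError on empty input, excluded by Pre_
  let width : Int := PySem.Str.len (input.headD "")
  let r := (PySem.List.pyRange 1 width).foldl
    (fun (st : List (List String) × Int) column_index =>
      if pvIsColumnBlank column_index input then
        (st.1 ++ [input.map (fun line => PySem.Str.slice line (some st.2) (some column_index))],
         column_index + 1)
      else st) ([], 0)
  r.1 ++ [input.map (fun line => PySem.Str.slice line (some r.2) none)]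

-- ===== PORT B =====
def chop_columns_alt (raw_input : String) : List (List String) :=
  let lines := PySem.Str.splitlines raw_input
  let height : Int := (lines.length : Int)
  -- lines[0]: IndexError on empty input, excluded by Pre_
  let width : Int := PySem.Str.len (lines.headD "")
  -- ''.join(line[i] for line in lines): a join of one-char strings is exactly the string of those
  -- chars; line[i] is in range under Pre_ (i < width ≤ len(line)), so the pyGetD default is dead
  let cols : List String := (PySem.List.pyRange 0 width).map
    (fun i => String.ofList (lines.map (fun line => PySem.List.pyGetD line.toList i ' ')))
  let blank : String := String.ofList (List.replicate lines.length ' ')  -- ' ' * height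
  let cuts : List Int := (PySem.List.pyRange 1 width).filter
    (fun i => PySem.List.pyGetD cols i "" == blank)
  let starts : List Int := 0 :: cuts.map (· + 1)
  let ends : List Int := cuts ++ [width]
  (starts.zip ends).map (fun se =>
    (PySem.List.pyRange 0 height).map (fun r =>
      String.ofList ((PySem.List.pyRange se.1 se.2).map
        (fun j => PySem.List.pyGetD (PySem.List.pyGetD cols j "").toList r ' '))))

-- ===== PRECONDITION & SPEC =====
-- Pre_ excludes the empty input and inputs having a line shorter than the first line: there A
-- raises IndexError whenever every earlier line is blank in the offending column, and otherwise
-- returns a value only by accident of all()'s short-circuit (B's column building raises there).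
def Pre_chop_columns (raw_input : String) : Prop :=
  let L := PySem.Str.splitlines raw_input
  L ≠ [] ∧ ∀ l ∈ L, (L.headD "").toList.length ≤ l.toList.length

instance (raw_input : String) : Decidable (Pre_chop_columns raw_input) := by
  unfold Pre_chop_columns; infer_instance

def pvWitness_chop_columns : String := "a b\nc d"

-- On inputs whose lines are all at least as long as the first but some strictly longer, A's last
-- block keeps each line's overhang beyond the grid width while B crops every block to the width
-- set by the first line; cropping to the grid width is the intended behaviour of a grid chopper.
def D_chop_columns (raw_input : String) : Prop :=
  let L := PySem.Str.splitlines raw_input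
  L ≠ [] ∧ (∀ l ∈ L, (L.headD "").toList.length ≤ l.toList.length) ∧
    ∃ l ∈ L, (L.headD "").toList.length < l.toList.length

instance (raw_input : String) : Decidable (D_chop_columns raw_input) := by
  unfold D_chop_columns; infer_instance

def Spec_chop_columns (raw_input : String) (out : List (List String)) : Prop :=
  ¬ D_chop_columns raw_input → out = chop_columns_alt raw_input

instance (raw_input : String) (out : List (List String)) : Decidable (Spec_chop_columns raw_input out) := by
  unfold Spec_chop_columns; infer_instance

def pvDiffWitness_chop_columns : String := "a b\nc dx"

def pvDiffWitnessOut_chop_columns : (List (List String)) × (List (List String)) :=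
  ([["a", "c"], ["b", "dx"]], [["a", "c"], ["b", "d"]])

-- ===== CLAIM (what is proved, stated in full; the proofs are below) =====
def Claim_unchanged_chop_columns : Prop := ∀ (raw_input : String), Dom_chop_columns raw_input →
  Pre_chop_columns raw_input → Spec_chop_columns raw_input (chop_columns raw_input)

def Claim_changed_chop_columns : Prop := Dom_chop_columns (pvDiffWitness_chop_columns) ∧
  Pre_chop_columns (pvDiffWitness_chop_columns) ∧ D_chop_columns (pvDiffWitness_chop_columns) ∧
  chop_columns (pvDiffWitness_chop_columns) = pvDiffWitnessOut_chop_columns.1 ∧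
  chop_columns_alt (pvDiffWitness_chop_columns) = pvDiffWitnessOut_chop_columns.2 ∧
  pvDiffWitnessOut_chop_columns.1 ≠ pvDiffWitnessOut_chop_columns.2

def Claim_exact_chop_columns : Prop := ∀ (raw_input : String), Dom_chop_columns raw_input →
  Pre_chop_columns raw_input → D_chop_columns raw_input →
  chop_columns raw_input ≠ chop_columns_alt raw_input

-- ===== LEMMAS AND PROOFS =====

/-- Cut list → list of (start, end) column pairs, as A's running `block_start` produces them. -/
def pvPairs (s : Int) : List Int → List (Int × Int)
  | [] => []
  | c :: cs => (s, c) :: pvPairs (c + 1) cs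

/-- The `block_start` left after processing all cuts. -/
def pvLast (s : Int) : List Int → Int
  | [] => s
  | c :: cs => pvLast (c + 1) cs

theorem pvFold {α : Type} (p : Int → Bool) (mk : Int → Int → α) (R : List Int)
    (acc : List α) (s : Int) :
    R.foldl (fun st ci => if p ci then (st.1 ++ [mk st.2 ci], ci + 1) else st) (acc, s)
      = (acc ++ (pvPairs s (R.filter p)).map (fun q => mk q.1 q.2), pvLast s (R.filter p)) := by
  induction R generalizing acc s with
  | nil => simp [pvPairs, pvLast]
  | cons c R ih =>
    by_cases hc : p c
    · simp [List.foldl_cons, hc, ih, pvPairs, pvLast]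
    · simp [List.foldl_cons, hc, ih]

theorem pvZip (w : Int) (cs : List Int) (s : Int) :
    (s :: cs.map (· + 1)).zip (cs ++ [w]) = pvPairs s cs ++ [(pvLast s cs, w)] := by
  induction cs generalizing s with
  | nil => simp [pvPairs, pvLast]
  | cons c cs ih => simp [pvPairs, pvLast, ih]

theorem pvPairs_mem (cs : List Int) (s : Int) :
    ∀ q ∈ pvPairs s cs, (q.1 = s ∨ ∃ c ∈ cs, q.1 = c + 1) ∧ q.2 ∈ cs := by
  induction cs generalizing s with
  | nil => simp [pvPairs]
  | cons c cs ih =>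
    intro q hq
    simp only [pvPairs, List.mem_cons] at hq
    rcases hq with rfl | hq
    · simp
    · rcases ih (c + 1) q hq with ⟨h1, h2⟩
      refine ⟨?_, by simp [h2]⟩
      rcases h1 with h1 | ⟨c', hc', h1⟩
      · exact Or.inr ⟨c, by simp, h1⟩
      · exact Or.inr ⟨c', by simp [hc'], h1⟩

theorem pvLast_mem (cs : List Int) (s : Int) :
    pvLast s cs = s ∨ ∃ c ∈ cs, pvLast s cs = c + 1 := by
  induction cs generalizing s with
  | nil => simp [pvLast]
  | cons c cs ih =>
    rcases ih (c + 1) with h | ⟨c', hc', h⟩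
    · exact Or.inr ⟨c, by simp, by simpa [pvLast] using h⟩
    · exact Or.inr ⟨c', by simp [hc'], by simpa [pvLast] using h⟩

/-- Mapping positional lookup over an integer range is a drop/take segment. -/
theorem pvRowSeg (xs : List Char) (s e : Int) (hs : 0 ≤ s) (he : e.toNat ≤ xs.length) :
    (PySem.List.pyRange s e).map (fun j => xs.getD j.toNat ' ')
      = (xs.drop s.toNat).take (e.toNat - s.toNat) := by
  have key : ∀ (n : Nat) (s : Int), 0 ≤ s → (e - s).toNat = n →
      (PySem.List.pyRange s e).map (fun j => xs.getD j.toNat ' ')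
        = (xs.drop s.toNat).take (e.toNat - s.toNat) := by
    intro n
    induction n with
    | zero =>
      intro s hs h0
      have hnil : PySem.List.pyRange s e = [] := by
        rw [List.eq_nil_iff_forall_not_mem]
        intro x hx
        rw [PySem.List.mem_pyRange_one] at hx
        omega
      have hz : e.toNat - s.toNat = 0 := by omega
      simp [hnil, hz]
    | succ n ih =>
      intro s hs h0
      have hlt : s < e := by omega
      have hsn : s.toNat < xs.length := by omega
      have h1 : (s + 1).toNat = s.toNat + 1 := by omega
      have h2 : e.toNat - s.toNat = (e.toNat - (s + 1).toNat) + 1 := by omega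
      rw [PySem.List.pyRange_one_cons hlt, List.map_cons, ih (s + 1) (by omega) (by omega),
        List.drop_eq_getElem_cons hsn, h2, List.take_succ_cons,
        List.getD_eq_getElem xs ' ' hsn, h1]
  exact key (e - s).toNat s hs rfl

/-- Under a rectangular grid, B's column-wise blank test agrees with A's `is_column_blank`. -/
theorem pvCut (L : List String) (w : Nat)
    (hwide : ∀ l ∈ L, w ≤ l.toList.length) (i : Int) (h1 : 1 ≤ i) (h2 : i < (w : Int)) :
    (PySem.List.pyGetD ((PySem.List.pyRange 0 (w : Int)).map
        (fun i => String.ofList (L.map (fun line => PySem.List.pyGetD line.toList i ' ')))) i ""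
      == String.ofList (List.replicate L.length ' '))
    = pvIsColumnBlank i L := by
  rw [PySem.List.pyGetD_map_pyRange_of_nonneg _ _ i _ (by omega) h2]
  rw [Bool.eq_iff_iff, beq_iff_eq, pvIsColumnBlank, List.all_eq_true]
  constructor
  · intro h l hl
    have := congrArg String.toList h
    simp only [String.toList_ofList] at this
    rw [List.map_eq_replicate_iff] at this
    have hg := this l hl
    rw [PySem.List.pyGetD_eq_getElem l.toList ' ' (by omega) (by have := hwide l hl; omega)] at hg
    rw [beq_iff_eq, PySem.Str.pyGet?_eq, PySem.Chars.pyGet?_eq_listPyGet?,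
      PySem.List.pyGet?_eq_some_getElem l.toList (by omega) (by have := hwide l hl; omega), hg]
  · intro h
    congr 1
    rw [List.map_eq_replicate_iff]
    intro l hl
    have hg := h l hl
    rw [beq_iff_eq, PySem.Str.pyGet?_eq, PySem.Chars.pyGet?_eq_listPyGet?,
      PySem.List.pyGet?_eq_some_getElem l.toList (by omega) (by have := hwide l hl; omega),
      Option.some_inj] at hg
    rw [PySem.List.pyGetD_eq_getElem l.toList ' ' (by omega) (by have := hwide l hl; omega), hg]

/-- Under a rectangular grid, B's column-range reconstruction is A's per-line slice. -/
theorem pvBlock (L : List String) (w : Nat)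
    (hwide : ∀ l ∈ L, w ≤ l.toList.length) (s e : Int)
    (hs : 0 ≤ s) (he : 0 ≤ e) (hew : e ≤ (w : Int)) :
    (PySem.List.pyRange 0 (L.length : Int)).map (fun r =>
        String.ofList ((PySem.List.pyRange s e).map
          (fun j => PySem.List.pyGetD (PySem.List.pyGetD ((PySem.List.pyRange 0 (w : Int)).map
              (fun i => String.ofList (L.map (fun line => PySem.List.pyGetD line.toList i ' '))))
            j "").toList r ' ')))
    = L.map (fun line => PySem.Str.slice line (some s) (some e)) := by
  rw [PySem.List.pyRange_zero_natCast L.length, List.map_map]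
  apply List.ext_getElem
  · simp
  · intro k hk1 hk2
    simp only [List.length_map, List.length_range] at hk1 hk2
    simp only [List.getElem_map, List.getElem_range, Function.comp]
    have hrow : ∀ j ∈ PySem.List.pyRange s e,
        PySem.List.pyGetD (PySem.List.pyGetD ((PySem.List.pyRange 0 (w : Int)).map
            (fun i => String.ofList (L.map (fun line => PySem.List.pyGetD line.toList i ' '))))
          j "").toList (k : Int) ' '
        = (L[k].toList).getD j.toNat ' ' := by
      intro j hj
      rw [PySem.List.mem_pyRange_one] at hj
      rw [PySem.List.pyGetD_map_pyRange_of_nonneg _ _ j _ (by omega) (by omega)]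
      rw [String.toList_ofList, PySem.List.pyGetD_natCast,
        List.getD_eq_getElem _ _ (by simpa using hk2), List.getElem_map]
      rw [PySem.List.pyGetD_eq_getElem L[k].toList ' ' (by omega)
        (by have := hwide L[k] (List.getElem_mem hk2); omega)]
      rw [List.getD_eq_getElem _ _ (by have := hwide L[k] (List.getElem_mem hk2); omega)]
    rw [List.map_congr_left hrow,
      pvRowSeg L[k].toList s e hs (by have := hwide L[k] (List.getElem_mem hk2); omega)]
    rw [PySem.Str.slice, PySem.Chars.slice_eq_listSlice, PySem.List.slice_toNat _ hs he]

/-- A's foldl over the column range, in closed pair-list form. -/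
theorem pvA_eq (L : List String) (W : Int) :
    ((PySem.List.pyRange 1 W).foldl (fun (st : List (List String) × Int) ci =>
        if pvIsColumnBlank ci L then
          (st.1 ++ [L.map (fun line => PySem.Str.slice line (some st.2) (some ci))], ci + 1)
        else st) ([], 0))
    = ((pvPairs 0 ((PySem.List.pyRange 1 W).filter (fun ci => pvIsColumnBlank ci L))).map
          (fun q => L.map (fun line => PySem.Str.slice line (some q.1) (some q.2))),
       pvLast 0 ((PySem.List.pyRange 1 W).filter (fun ci => pvIsColumnBlank ci L))) := by
  simpa using pvFold (fun ci => pvIsColumnBlank ci L)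
    (fun s ci => L.map (fun line => PySem.Str.slice line (some s) (some ci)))
    (PySem.List.pyRange 1 W) [] 0

/-- The whole function, on a rectangular non-empty grid: A's fold equals B's column pass. -/
theorem pvMain (L : List String) (w : Nat)
    (hrect : ∀ l ∈ L, l.toList.length = w) :
    ((PySem.List.pyRange 1 (w : Int)).foldl (fun (st : List (List String) × Int) ci =>
        if pvIsColumnBlank ci L then
          (st.1 ++ [L.map (fun line => PySem.Str.slice line (some st.2) (some ci))], ci + 1)
        else st) ([], 0)).1
      ++ [L.map (fun line => PySem.Str.slice line
            (some ((PySem.List.pyRange 1 (w : Int)).foldl (fun (st : List (List String) × Int) ci =>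
              if pvIsColumnBlank ci L then
                (st.1 ++ [L.map (fun line => PySem.Str.slice line (some st.2) (some ci))], ci + 1)
              else st) ([], 0)).2) none)]
    = ((0 :: ((PySem.List.pyRange 1 (w : Int)).filter (fun i =>
          PySem.List.pyGetD ((PySem.List.pyRange 0 (w : Int)).map
              (fun i => String.ofList (L.map (fun line => PySem.List.pyGetD line.toList i ' '))))
            i "" == String.ofList (List.replicate L.length ' '))).map (· + 1)).zip
        (((PySem.List.pyRange 1 (w : Int)).filter (fun i =>
          PySem.List.pyGetD ((PySem.List.pyRange 0 (w : Int)).map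
              (fun i => String.ofList (L.map (fun line => PySem.List.pyGetD line.toList i ' '))))
            i "" == String.ofList (List.replicate L.length ' '))) ++ [(w : Int)])).map
      (fun se => (PySem.List.pyRange 0 (L.length : Int)).map (fun r =>
        String.ofList ((PySem.List.pyRange se.1 se.2).map
          (fun j => PySem.List.pyGetD (PySem.List.pyGetD ((PySem.List.pyRange 0 (w : Int)).map
              (fun i => String.ofList (L.map (fun line => PySem.List.pyGetD line.toList i ' '))))
            j "").toList r ' ')))) := by
  have hwide : ∀ l ∈ L, w ≤ l.toList.length := fun l hl => (hrect l hl).ge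
  have hcuts : ((PySem.List.pyRange 1 (w : Int)).filter (fun i =>
        PySem.List.pyGetD ((PySem.List.pyRange 0 (w : Int)).map
            (fun i => String.ofList (L.map (fun line => PySem.List.pyGetD line.toList i ' '))))
          i "" == String.ofList (List.replicate L.length ' ')))
      = ((PySem.List.pyRange 1 (w : Int)).filter (fun ci => pvIsColumnBlank ci L)) := by
    apply List.filter_congr
    intro i hi
    rw [PySem.List.mem_pyRange_one] at hi
    exact pvCut L w hwide i hi.1 hi.2
  rw [pvA_eq, hcuts, pvZip, List.map_append, List.map_cons, List.map_nil]
  have hcs : ∀ c ∈ (PySem.List.pyRange 1 (w : Int)).filter (fun ci => pvIsColumnBlank ci L),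
      1 ≤ c ∧ c < (w : Int) := by
    intro c hc
    exact PySem.List.mem_pyRange_one.mp (List.mem_filter.mp hc).1
  congr 1
  · apply List.map_congr_left
    intro q hq
    obtain ⟨hq1, hq2⟩ := pvPairs_mem _ 0 q hq
    have hs : 0 ≤ q.1 := by
      rcases hq1 with h | ⟨c, hc, h⟩
      · omega
      · have := hcs c hc; omega
    have he2 := hcs q.2 hq2
    exact (pvBlock L w hwide q.1 q.2 hs (by omega) (by omega)).symm
  · have hlast : 0 ≤ pvLast 0 ((PySem.List.pyRange 1 (w : Int)).filter
        (fun ci => pvIsColumnBlank ci L)) ∧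
        pvLast 0 ((PySem.List.pyRange 1 (w : Int)).filter (fun ci => pvIsColumnBlank ci L))
          ≤ (w : Int) := by
      rcases pvLast_mem ((PySem.List.pyRange 1 (w : Int)).filter
        (fun ci => pvIsColumnBlank ci L)) 0 with h | ⟨c, hc, h⟩
      · omega
      · have := hcs c hc; omega
    have htail : L.map (fun line => PySem.Str.slice line
          (some (pvLast 0 ((PySem.List.pyRange 1 (w : Int)).filter
            (fun ci => pvIsColumnBlank ci L)))) none)
        = L.map (fun line => PySem.Str.slice line
          (some (pvLast 0 ((PySem.List.pyRange 1 (w : Int)).filter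
            (fun ci => pvIsColumnBlank ci L)))) (some (w : Int))) := by
      apply List.map_congr_left
      intro l hl
      rw [PySem.Str.slice, PySem.Str.slice, PySem.Chars.slice_eq_listSlice,
        PySem.Chars.slice_eq_listSlice, PySem.List.slice_from _ hlast.1,
        PySem.List.slice_toNat _ hlast.1 (by omega)]
      rw [List.take_of_length_le (by simp [hrect l hl])]
    rw [htail, ← pvBlock L w hwide _ _ hlast.1 (by omega) le_rfl]

theorem pvMainNe (L : List String) (w : Nat)
    (hwide : ∀ l ∈ L, w ≤ l.toList.length)
    (l0 : String) (hl0 : l0 ∈ L) (hlen : w < l0.toList.length) :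
    ((PySem.List.pyRange 1 (w : Int)).foldl (fun (st : List (List String) × Int) ci =>
        if pvIsColumnBlank ci L then
          (st.1 ++ [L.map (fun line => PySem.Str.slice line (some st.2) (some ci))], ci + 1)
        else st) ([], 0)).1
      ++ [L.map (fun line => PySem.Str.slice line
            (some ((PySem.List.pyRange 1 (w : Int)).foldl (fun (st : List (List String) × Int) ci =>
              if pvIsColumnBlank ci L then
                (st.1 ++ [L.map (fun line => PySem.Str.slice line (some st.2) (some ci))], ci + 1)
              else st) ([], 0)).2) none)]
    ≠ ((0 :: ((PySem.List.pyRange 1 (w : Int)).filter (fun i =>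
          PySem.List.pyGetD ((PySem.List.pyRange 0 (w : Int)).map
              (fun i => String.ofList (L.map (fun line => PySem.List.pyGetD line.toList i ' '))))
            i "" == String.ofList (List.replicate L.length ' '))).map (· + 1)).zip
        (((PySem.List.pyRange 1 (w : Int)).filter (fun i =>
          PySem.List.pyGetD ((PySem.List.pyRange 0 (w : Int)).map
              (fun i => String.ofList (L.map (fun line => PySem.List.pyGetD line.toList i ' '))))
            i "" == String.ofList (List.replicate L.length ' '))) ++ [(w : Int)])).map
      (fun se => (PySem.List.pyRange 0 (L.length : Int)).map (fun r =>
        String.ofList ((PySem.List.pyRange se.1 se.2).map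
          (fun j => PySem.List.pyGetD (PySem.List.pyGetD ((PySem.List.pyRange 0 (w : Int)).map
              (fun i => String.ofList (L.map (fun line => PySem.List.pyGetD line.toList i ' '))))
            j "").toList r ' '))))  := by
  have hcuts : ((PySem.List.pyRange 1 (w : Int)).filter (fun i =>
        PySem.List.pyGetD ((PySem.List.pyRange 0 (w : Int)).map
            (fun i => String.ofList (L.map (fun line => PySem.List.pyGetD line.toList i ' '))))
          i "" == String.ofList (List.replicate L.length ' ')))
      = ((PySem.List.pyRange 1 (w : Int)).filter (fun ci => pvIsColumnBlank ci L)) := by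
    apply List.filter_congr
    intro i hi
    rw [PySem.List.mem_pyRange_one] at hi
    exact pvCut L w hwide i hi.1 hi.2
  rw [pvA_eq, hcuts, pvZip, List.map_append, List.map_cons, List.map_nil]
  dsimp only
  have hcs : ∀ c ∈ (PySem.List.pyRange 1 (w : Int)).filter (fun ci => pvIsColumnBlank ci L),
      1 ≤ c ∧ c < (w : Int) := by
    intro c hc
    exact PySem.List.mem_pyRange_one.mp (List.mem_filter.mp hc).1
  have hpairs : ((pvPairs 0 ((PySem.List.pyRange 1 (w : Int)).filter
        (fun ci => pvIsColumnBlank ci L))).map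
          (fun q => L.map (fun line => PySem.Str.slice line (some q.1) (some q.2))))
      = ((pvPairs 0 ((PySem.List.pyRange 1 (w : Int)).filter
        (fun ci => pvIsColumnBlank ci L))).map
          (fun se => (PySem.List.pyRange 0 (L.length : Int)).map (fun r =>
            String.ofList ((PySem.List.pyRange se.1 se.2).map
              (fun j => PySem.List.pyGetD (PySem.List.pyGetD ((PySem.List.pyRange 0 (w : Int)).map
                  (fun i => String.ofList (L.map
                    (fun line => PySem.List.pyGetD line.toList i ' '))))
                j "").toList r ' '))))) := by
    apply List.map_congr_left
    intro q hq
    obtain ⟨hq1, hq2⟩ := pvPairs_mem _ 0 q hq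
    have hs : 0 ≤ q.1 := by
      rcases hq1 with h | ⟨c, hc, h⟩
      · omega
      · have := hcs c hc; omega
    have he2 := hcs q.2 hq2
    exact (pvBlock L w hwide q.1 q.2 hs (by omega) (by omega)).symm
  rw [hpairs]
  intro heq
  have htails := List.append_cancel_left heq
  have hlast : 0 ≤ pvLast 0 ((PySem.List.pyRange 1 (w : Int)).filter
      (fun ci => pvIsColumnBlank ci L)) ∧
      pvLast 0 ((PySem.List.pyRange 1 (w : Int)).filter (fun ci => pvIsColumnBlank ci L))
        ≤ (w : Int) := by
    rcases pvLast_mem ((PySem.List.pyRange 1 (w : Int)).filter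
      (fun ci => pvIsColumnBlank ci L)) 0 with h | ⟨c, hc, h⟩
    · omega
    · have := hcs c hc; omega
  rw [pvBlock L w hwide _ _ hlast.1 (by omega) le_rfl, List.cons.injEq] at htails
  have hpt := (List.map_inj_left.mp htails.1) l0 hl0
  have hlens := congrArg (fun t => t.toList.length) hpt
  simp only [PySem.Str.slice, PySem.Chars.slice_eq_listSlice, String.toList_ofList] at hlens
  rw [PySem.List.slice_from _ hlast.1, PySem.List.slice_toNat _ hlast.1 (by omega)] at hlens
  simp only [List.length_take, List.length_drop] at hlens
  omega

-- ===== VERDICT (by name: the statement is the Claim_ definition above) =====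
theorem chop_columns_spec : Claim_unchanged_chop_columns := by
  intro raw _hdom hpre hnd
  simp only [Pre_chop_columns] at hpre
  obtain ⟨hne, hge⟩ := hpre
  simp only [D_chop_columns] at hnd
  have hrect : ∀ l ∈ PySem.Str.splitlines raw,
      l.toList.length = ((PySem.Str.splitlines raw).headD "").toList.length := by
    intro l hl
    by_contra hbad
    exact hnd ⟨hne, hge, l, hl, by have := hge l hl; omega⟩
  show chop_columns raw = chop_columns_alt raw
  unfold chop_columns chop_columns_alt
  simp only [PySem.Str.len_eq]
  exact pvMain (PySem.Str.splitlines raw) (((PySem.Str.splitlines raw).headD "").toList.length)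
    hrect

theorem chop_columns_changed : Claim_changed_chop_columns := by
  unfold Claim_changed_chop_columns; decide

theorem chop_columns_tight : Claim_exact_chop_columns := by
  intro raw _hdom hpre hd
  simp only [Pre_chop_columns] at hpre
  obtain ⟨hne, hge⟩ := hpre
  simp only [D_chop_columns] at hd
  obtain ⟨-, -, l0, hl0, hlen⟩ := hd
  show chop_columns raw ≠ chop_columns_alt raw
  unfold chop_columns chop_columns_alt
  simp only [PySem.Str.len_eq]
  exact pvMainNe (PySem.Str.splitlines raw)
    (((PySem.Str.splitlines raw).headD "").toList.length)
    (fun l hl => hge l hl) l0 hl0 hlen
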